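-- pv_equiv track=rewrite | github.com/michcic/NewDissertation | VisualisationOldVersion.py | chain_code
-- ===== SOURCE A (Python) =====
-- def chain_code(directions, startx, starty):
--     xpos = startx  # Starting position of contour
--     ypos = starty
--
--     contour = []  # Stores contour
--
--     # Loop goes through array of chain code
--     # and calculates coordinate of each of the pixel of the contour
--     for d in directions:
--         if d == 0:
--             xpos -= 1
--         elif d == 1:
--             xpos -= 1
--             ypos -= 1
--         elif d == 2:
--             ypos -= 1
--         elif d == 3:
--             ypos -= 1
--             xpos += 1
--         elif d == 4:
--             xpos += 1
--         elif d == 5: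
--             ypos += 1
--             xpos += 1
--         elif d == 6:
--             ypos += 1
--         elif d == 7:
--             ypos += 1
--             xpos -= 1
--
--         contour.append([xpos, ypos])  # Add position of the pixel to array
--
--     return contour
-- ===== SOURCE B (Python) =====
-- # Two-phase map-then-scan: map codes to (dx,dy) deltas, prefix-sum x and y
-- # independently, then zip; unknown codes contribute (0,0) like A's fall-through.
-- _DELTA = {0: (-1, 0), 1: (-1, -1), 2: (0, -1), 3: (1, -1),
--           4: (1, 0), 5: (1, 1), 6: (0, 1), 7: (-1, 1)}
--
--
-- def _prefix_sums(init, steps):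
--     out = []
--     for s in steps:
--         init += s
--         out.append(init)
--     return out
--
--
-- def chain_code(directions, startx, starty):
--     deltas = [_DELTA.get(d, (0, 0)) for d in directions]
--     xs = _prefix_sums(startx, [dx for dx, _ in deltas])
--     ys = _prefix_sums(starty, [dy for _, dy in deltas])
--     return [[x, y] for x, y in zip(xs, ys)]
-- ===== Notes on version B (the rewrite author's own statement) =====
-- stated objective: alternative
-- what changed: Replaced the single running-accumulator loop with an eight-way if/elif chain by a two-phase map-then-scan: map each code to a (dx,dy) delta via a table, prefix-sum the x- and y-deltas independently, and zip the two coordinate streams into [x,y] pairs.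
import Mathlib
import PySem

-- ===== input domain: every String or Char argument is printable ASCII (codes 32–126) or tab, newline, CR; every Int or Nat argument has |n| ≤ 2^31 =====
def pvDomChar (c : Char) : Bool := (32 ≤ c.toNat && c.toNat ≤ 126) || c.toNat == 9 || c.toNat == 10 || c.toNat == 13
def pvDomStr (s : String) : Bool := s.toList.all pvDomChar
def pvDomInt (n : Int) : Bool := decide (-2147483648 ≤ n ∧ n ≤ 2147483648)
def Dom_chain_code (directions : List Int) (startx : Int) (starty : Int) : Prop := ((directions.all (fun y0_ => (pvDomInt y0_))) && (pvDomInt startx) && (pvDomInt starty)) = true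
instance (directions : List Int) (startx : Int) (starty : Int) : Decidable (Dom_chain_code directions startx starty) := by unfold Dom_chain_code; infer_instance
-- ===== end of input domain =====

-- B replaces A's single running-accumulator loop by a map-to-deltas phase,
-- two independent prefix-sum scans, and a zip (alternative decomposition, same cost).


-- ===== PORT A =====
-- A's loop body: the if/elif chain updating (xpos, ypos)
def pyStep (d : Int) (xpos ypos : Int) : Int × Int :=
  if d = 0 then (xpos - 1, ypos)
  else if d = 1 then (xpos - 1, ypos - 1)
  else if d = 2 then (xpos, ypos - 1)
  else if d = 3 then (xpos + 1, ypos - 1)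
  else if d = 4 then (xpos + 1, ypos)
  else if d = 5 then (xpos + 1, ypos + 1)
  else if d = 6 then (xpos, ypos + 1)
  else if d = 7 then (xpos - 1, ypos + 1)
  else (xpos, ypos)

-- the loop body as a named step (append to the running contour)
def chainAStep (st : Int × Int × List (List Int)) (d : Int) : Int × Int × List (List Int) :=
  let p := pyStep d st.1 st.2.1
  (p.1, p.2, st.2.2 ++ [[p.1, p.2]])

def chain_code (directions : List Int) (startx : Int) (starty : Int) : List (List Int) :=
  (directions.foldl chainAStep (startx, starty, [])).2.2

-- ===== PORT B =====
-- B's delta table (dict lookup with default (0,0))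
def deltaOf (d : Int) : Int × Int :=
  (PySem.Dict.getD (PySem.Dict.ofList
    [((0 : Int), ((-1 : Int), (0 : Int))), (1, (-1, -1)), (2, (0, -1)), (3, (1, -1)),
     (4, (1, 0)), (5, (1, 1)), (6, (0, 1)), (7, (-1, 1))]) d (0, 0))

-- B's _prefix_sums loop
def scanStep (st : Int × List Int) (s : Int) : Int × List Int :=
  (st.1 + s, st.2 ++ [st.1 + s])

def prefixSums (init : Int) (steps : List Int) : List Int :=
  (steps.foldl scanStep (init, [])).2

def chain_code_alt (directions : List Int) (startx : Int) (starty : Int) : List (List Int) :=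
  let deltas := directions.map deltaOf
  let xs := prefixSums startx (deltas.map (fun p => p.1))
  let ys := prefixSums starty (deltas.map (fun p => p.2))
  List.zipWith (fun x y => [x, y]) xs ys

-- ===== PRECONDITION & SPEC =====
def Spec_chain_code (directions : List Int) (startx : Int) (starty : Int) (out : List (List Int)) : Prop := out = chain_code_alt directions startx starty
instance (directions : List Int) (startx : Int) (starty : Int) (out : List (List Int)) : Decidable (Spec_chain_code directions startx starty out) := by unfold Spec_chain_code; infer_instance

-- ===== CLAIM (what is proved, stated in full; the proofs are below) =====
def Claim_equal_chain_code : Prop := ∀ (directions : List Int) (startx : Int) (starty : Int), Dom_chain_code directions startx starty → Spec_chain_code directions startx starty (chain_code directions startx starty)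

-- ===== LEMMAS AND PROOFS =====

-- A's fold: the accumulated contour is a prefix of the result
theorem chainA_go (directions : List Int) (x y : Int) (acc : List (List Int)) :
    (directions.foldl chainAStep (x, y, acc)).2.2 = acc ++ chain_code directions x y := by
  induction directions generalizing x y acc with
  | nil => simp [chain_code]
  | cons d ds ih =>
      simp only [chain_code, List.foldl_cons, chainAStep, List.nil_append]
      rw [ih, ih ((pyStep d x y).1) ((pyStep d x y).2) [[ (pyStep d x y).1, (pyStep d x y).2 ]]]
      simp [chain_code]

theorem chain_code_cons (d : Int) (ds : List Int) (x y : Int) :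
    chain_code (d :: ds) x y =
      [(pyStep d x y).1, (pyStep d x y).2] :: chain_code ds (pyStep d x y).1 (pyStep d x y).2 := by
  simp only [chain_code, List.foldl_cons, chainAStep]
  rw [chainA_go]
  simp [chain_code]

-- B's scan: accumulator lemma and cons unfolding
theorem prefixSums_go (steps : List Int) (v : Int) (acc : List Int) :
    ((steps.foldl scanStep (v, acc)).2) = acc ++ prefixSums v steps := by
  induction steps generalizing v acc with
  | nil => simp [prefixSums]
  | cons s ss ih =>
      simp only [prefixSums, List.foldl_cons, scanStep, List.nil_append]
      rw [ih, ih (v + s) [v + s]]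
      simp [prefixSums]

theorem prefixSums_cons (v s : Int) (ss : List Int) :
    prefixSums v (s :: ss) = (v + s) :: prefixSums (v + s) ss := by
  simp only [prefixSums, List.foldl_cons, scanStep]
  rw [prefixSums_go]
  simp [prefixSums]

theorem chain_code_alt_cons (d : Int) (ds : List Int) (x y : Int) :
    chain_code_alt (d :: ds) x y =
      [x + (deltaOf d).1, y + (deltaOf d).2] ::
        chain_code_alt ds (x + (deltaOf d).1) (y + (deltaOf d).2) := by
  simp [chain_code_alt, prefixSums_cons]

-- A's if/elif chain computes exactly the delta table's step
theorem pyStep_eq_delta (d x y : Int) :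
    pyStep d x y = (x + (deltaOf d).1, y + (deltaOf d).2) := by
  unfold pyStep deltaOf
  simp only [PySem.Dict.ofList, PySem.Dict.update, List.foldl_cons, List.foldl_nil,
    PySem.Dict.getD_insert, PySem.Dict.getD_empty]
  split_ifs <;> simp_all [Prod.ext_iff] <;> omega

theorem chain_eq (directions : List Int) (x y : Int) :
    chain_code directions x y = chain_code_alt directions x y := by
  induction directions generalizing x y with
  | nil => simp [chain_code, chain_code_alt, prefixSums]
  | cons d ds ih =>
      rw [chain_code_cons, chain_code_alt_cons, pyStep_eq_delta]
      simp [ih]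

-- ===== VERDICT (by name: the statement is the Claim_ definition above) =====
theorem chain_code_spec : Claim_equal_chain_code := by
  intro directions startx starty _
  unfold Spec_chain_code
  exact chain_eq directions startx starty
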